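-- pv_equiv track=rewrite | github.com/unwave/blend_converter | blender/bpy_uv.py | get_spiral_shifts
-- ===== SOURCE A (Python) =====
-- def get_spiral_shifts(n = 6):
--
--     coord = [0,0]
--     coords = [tuple(coord)]
--
--     for k in range(1, n):
--
--         shift = -1 if k % 2 else 1
--
--         for _ in range(k):
--             coord[0] -= shift
--             coords.append(tuple(coord))
--
--         for _ in range(k):
--             coord[1] += shift
--             coords.append(tuple(coord))
--
--     return coords
-- ===== SOURCE B (Python) =====
-- def get_spiral_shifts(n = 6):
--     coords = [(0, 0)]
--     for k in range(1, n):
--         d = 1 if k % 2 else -1       # x-direction of ring k, from k alone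
--         a = -(k // 2) * d            # closed-form start of ring k (end of ring k-1) is (a, -a)
--         b = a + k * d                # closed-form corner where ring k turns
--         coords += [(a + j * d, -a) for j in range(1, k + 1)]
--         coords += [(b, -a - j * d) for j in range(1, k + 1)]
--     return coords
-- ===== Notes on version B (the rewrite author's own statement) =====
-- stated objective: alternative
-- what changed: B drops A's stateful walk (a mutable running coordinate stepped and appended inside per-step loops) and instead derives each ring's start corner a, turn corner b and direction d in closed form from k alone, emitting every coordinate as a pure formula of (k, j) via comprehensions, so no position state is threaded between steps.
import Mathlib
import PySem

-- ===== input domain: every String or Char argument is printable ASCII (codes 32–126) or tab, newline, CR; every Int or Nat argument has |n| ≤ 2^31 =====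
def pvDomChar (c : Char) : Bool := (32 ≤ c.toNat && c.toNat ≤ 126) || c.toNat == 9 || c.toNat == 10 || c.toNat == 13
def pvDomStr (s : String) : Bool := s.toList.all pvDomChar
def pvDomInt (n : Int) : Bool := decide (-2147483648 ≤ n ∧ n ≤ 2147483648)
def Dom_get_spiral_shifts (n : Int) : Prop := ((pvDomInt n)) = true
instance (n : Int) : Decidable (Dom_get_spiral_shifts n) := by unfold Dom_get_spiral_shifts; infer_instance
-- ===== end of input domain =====

-- B replaces A's stateful step-by-step spiral walk by closed-form per-ring corners and a
-- direct formula for each coordinate in (ring k, step j) (objective: alternative).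
-- ===== PORT A =====
def get_spiral_shifts (n : Int) : List (Int × Int) :=
  let init : (Int × Int) × List (Int × Int) := ((0, 0), [(0, 0)])
  let st := (PySem.List.pyRange 1 n 1).foldl (fun st k =>
      let shift : Int := if PySem.Int.mod k 2 ≠ 0 then -1 else 1
      let st1 := (PySem.List.pyRange 0 k 1).foldl (fun st _ =>
          let c := (st.1.1 - shift, st.1.2)
          (c, st.2 ++ [c])) st
      (PySem.List.pyRange 0 k 1).foldl (fun st _ =>
          let c := (st.1.1, st.1.2 + shift)
          (c, st.2 ++ [c])) st1) init
  st.2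

-- ===== PORT B =====
def pvRingB (coords : List (Int × Int)) (k : Int) : List (Int × Int) :=
  let d : Int := if PySem.Int.mod k 2 ≠ 0 then 1 else -1
  let a : Int := -(PySem.Int.floordiv k 2) * d
  let b : Int := a + k * d
  let coords := coords ++ (PySem.List.pyRange 1 (k + 1) 1).map (fun j => (a + j * d, -a))
  coords ++ (PySem.List.pyRange 1 (k + 1) 1).map (fun j => (b, -a - j * d))

def get_spiral_shifts_alt (n : Int) : List (Int × Int) :=
  (PySem.List.pyRange 1 n 1).foldl pvRingB [(0, 0)]

-- ===== PRECONDITION & SPEC =====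
def Spec_get_spiral_shifts (n : Int) (out : List (Int × Int)) : Prop := out = get_spiral_shifts_alt n
instance (n : Int) (out : List (Int × Int)) : Decidable (Spec_get_spiral_shifts n out) := by unfold Spec_get_spiral_shifts; infer_instance

-- ===== CLAIM (what is proved, stated in full; the proofs are below) =====
def Claim_equal_get_spiral_shifts : Prop := ∀ (n : Int), Dom_get_spiral_shifts n → Spec_get_spiral_shifts n (get_spiral_shifts n)

-- ===== LEMMAS AND PROOFS =====

-- named copies of A's inner loop bodies and outer fold body
def pvXstep (shift : Int) (st : (Int × Int) × List (Int × Int)) (_ : Int) :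
    (Int × Int) × List (Int × Int) :=
  let c := (st.1.1 - shift, st.1.2)
  (c, st.2 ++ [c])

def pvYstep (shift : Int) (st : (Int × Int) × List (Int × Int)) (_ : Int) :
    (Int × Int) × List (Int × Int) :=
  let c := (st.1.1, st.1.2 + shift)
  (c, st.2 ++ [c])

def pvAF (st : (Int × Int) × List (Int × Int)) (k : Int) : (Int × Int) × List (Int × Int) :=
  (PySem.List.pyRange 0 k 1).foldl (pvYstep (if PySem.Int.mod k 2 ≠ 0 then -1 else 1))
    ((PySem.List.pyRange 0 k 1).foldl (pvXstep (if PySem.Int.mod k 2 ≠ 0 then -1 else 1)) st)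

theorem pvA_def (n : Int) :
    get_spiral_shifts n = ((PySem.List.pyRange 1 n 1).foldl pvAF ((0, 0), [(0, 0)])).2 := rfl

-- end-of-ring position (x-coordinate): c_0 = 0, c_k = c_{k-1} + k * (-1)^(k+1)
def pvC : Nat → Int
  | 0 => 0
  | m + 1 => pvC m + ((m : Int) + 1) * (if (m + 1) % 2 = 1 then 1 else -1)

theorem pvC_closed (m : Nat) :
    (m % 2 = 0 ∧ pvC m = -((m / 2 : Nat) : Int)) ∨
    (m % 2 = 1 ∧ pvC m = ((m / 2 : Nat) : Int) + 1) := by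
  induction m with
  | zero => left; simp [pvC]
  | succ m ih =>
      rcases ih with ⟨hp, hv⟩ | ⟨hp, hv⟩
      · right
        refine ⟨by omega, ?_⟩
        simp only [pvC, hv]
        rw [if_pos (by omega)]
        omega
      · left
        refine ⟨by omega, ?_⟩
        simp only [pvC, hv]
        rw [if_neg (by omega)]
        omega

-- A's inner x-loop characterised: fold of k steps from (x,y) with list L
theorem pvXfold (k : Nat) (shift x y : Int) (L : List (Int × Int)) :
    (PySem.List.pyRange 0 (k : Int) 1).foldl (pvXstep shift) ((x, y), L)
    = ((x - (k : Int) * shift, y),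
       L ++ (List.range k).map (fun (j : Nat) => (x - ((j : Int) + 1) * shift, y))) := by
  induction k generalizing L x with
  | zero => simp [PySem.List.pyRange_one_eq_nil]
  | succ k ih =>
      rw [show ((k + 1 : Nat) : Int) = (k : Int) + 1 by push_cast; ring,
        PySem.List.pyRange_one_succ_right (by positivity), List.foldl_append]
      rw [ih]
      simp only [List.foldl_cons, List.foldl_nil, List.range_succ, List.map_append,
        List.map_cons, List.map_nil, List.append_assoc, pvXstep]
      rw [show x - (k : Int) * shift - shift = x - ((k : Int) + 1) * shift by ring]

-- A's inner y-loop characterised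
theorem pvYfold (k : Nat) (shift x y : Int) (L : List (Int × Int)) :
    (PySem.List.pyRange 0 (k : Int) 1).foldl (pvYstep shift) ((x, y), L)
    = ((x, y + (k : Int) * shift),
       L ++ (List.range k).map (fun (j : Nat) => (x, y + ((j : Int) + 1) * shift))) := by
  induction k generalizing L y with
  | zero => simp [PySem.List.pyRange_one_eq_nil]
  | succ k ih =>
      rw [show ((k + 1 : Nat) : Int) = (k : Int) + 1 by push_cast; ring,
        PySem.List.pyRange_one_succ_right (by positivity), List.foldl_append]
      rw [ih]
      simp only [List.foldl_cons, List.foldl_nil, List.range_succ, List.map_append,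
        List.map_cons, List.map_nil, List.append_assoc, pvYstep]
      rw [show y + (k : Int) * shift + shift = y + ((k : Int) + 1) * shift by ring]

-- B's ring k = m+1, written as two List.range maps
theorem pvBring (m : Nat) (L : List (Int × Int)) (d a : Int)
    (hd : d = if PySem.Int.mod ((m + 1 : Nat) : Int) 2 ≠ 0 then 1 else -1)
    (ha : a = -(PySem.Int.floordiv ((m + 1 : Nat) : Int) 2) * d) :
    pvRingB L ((m + 1 : Nat) : Int)
    = L ++ (List.range (m + 1)).map (fun (j : Nat) => (a + ((j : Int) + 1) * d, -a))
        ++ (List.range (m + 1)).map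
            (fun (j : Nat) => (a + ((m + 1 : Nat) : Int) * d, -a - ((j : Int) + 1) * d)) := by
  simp only [pvRingB]
  rw [← hd, ← ha]
  congr 1
  · congr 1
    rw [PySem.List.pyRange_one]
    rw [show ((((m + 1 : Nat) : Int) + 1) - 1).toNat = m + 1 by omega]
    simp only [List.map_map]
    apply List.map_congr_left
    intro j _
    simp only [Function.comp_apply]
    rw [show (1 : Int) + (j : Int) = (j : Int) + 1 by ring]
  · rw [PySem.List.pyRange_one]
    rw [show ((((m + 1 : Nat) : Int) + 1) - 1).toNat = m + 1 by omega]
    simp only [List.map_map]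
    apply List.map_congr_left
    intro j _
    simp only [Function.comp_apply]
    rw [show (1 : Int) + (j : Int) = (j : Int) + 1 by ring]

-- one ring of A equals one ring of B, and the running position is pvC
theorem pvRing (m : Nat) (L : List (Int × Int)) :
    pvAF ((pvC m, -(pvC m)), L) ((m + 1 : Nat) : Int)
    = ((pvC (m + 1), -(pvC (m + 1))), pvRingB L ((m + 1 : Nat) : Int)) := by
  rcases pvC_closed m with ⟨hp, hv⟩ | ⟨hp, hv⟩
  · -- m even, k = m+1 odd: shift = -1, d = 1
    have hmod : PySem.Int.mod ((m + 1 : Nat) : Int) 2 = 1 := by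
      rw [PySem.Int.mod_eq_emod_of_pos (by norm_num)]; omega
    have hdiv : PySem.Int.floordiv ((m + 1 : Nat) : Int) 2 = ((m / 2 : Nat) : Int) := by
      rw [PySem.Int.floordiv_eq_ediv_of_pos (by norm_num)]; omega
    have hCm1 : pvC (m + 1) = pvC m + ((m : Int) + 1) := by
      simp only [pvC]
      rw [if_pos (by omega)]; ring
    rw [pvBring m L 1 (-((m / 2 : Nat) : Int) * 1)
      (by rw [hmod]; norm_num) (by rw [hdiv])]
    unfold pvAF
    rw [hmod]
    rw [if_pos (show ((1:Int) ≠ 0) by norm_num), pvXfold, pvYfold]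
    simp only [Prod.mk.injEq]
    refine ⟨⟨by rw [hCm1]; push_cast; ring, by rw [hCm1]; push_cast; ring⟩, ?_⟩
    congr 1
    · congr 1
      apply List.map_congr_left
      intro j _
      simp only [Prod.mk.injEq]
      rw [hv]; push_cast; exact ⟨by ring, by ring⟩
    · apply List.map_congr_left
      intro j _
      simp only [Prod.mk.injEq]
      rw [hv]; push_cast; exact ⟨by ring, by ring⟩
  · -- m odd, k = m+1 even: shift = 1, d = -1
    have hmod : PySem.Int.mod ((m + 1 : Nat) : Int) 2 = 0 := by
      rw [PySem.Int.mod_eq_emod_of_pos (by norm_num)]; omega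
    have hdiv : PySem.Int.floordiv ((m + 1 : Nat) : Int) 2 = ((m / 2 : Nat) : Int) + 1 := by
      rw [PySem.Int.floordiv_eq_ediv_of_pos (by norm_num)]; omega
    have hCm1 : pvC (m + 1) = pvC m - ((m : Int) + 1) := by
      simp only [pvC]
      rw [if_neg (by omega)]; ring
    rw [pvBring m L (-1) (-(((m / 2 : Nat) : Int) + 1) * (-1))
      (by rw [hmod]; norm_num) (by rw [hdiv])]
    unfold pvAF
    rw [hmod]
    rw [if_neg (show ¬((0:Int) ≠ 0) by norm_num), pvXfold, pvYfold]
    simp only [Prod.mk.injEq]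
    refine ⟨⟨by rw [hCm1]; push_cast; ring, by rw [hCm1]; push_cast; ring⟩, ?_⟩
    congr 1
    · congr 1
      apply List.map_congr_left
      intro j _
      simp only [Prod.mk.injEq]
      rw [hv]; push_cast; exact ⟨by ring, by ring⟩
    · apply List.map_congr_left
      intro j _
      simp only [Prod.mk.injEq]
      rw [hv]; push_cast; exact ⟨by ring, by ring⟩

-- the whole fold: after rings 1..m, A's state is (pvC m, -pvC m) with B's list
theorem pvFold (m : Nat) :
    (PySem.List.pyRange 1 (1 + (m : Int)) 1).foldl pvAF ((0, 0), [(0, 0)])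
    = ((pvC m, -(pvC m)),
       (PySem.List.pyRange 1 (1 + (m : Int)) 1).foldl pvRingB [(0, 0)]) := by
  induction m with
  | zero => simp [PySem.List.pyRange_one_eq_nil, pvC]
  | succ m ih =>
      have hR : PySem.List.pyRange 1 (1 + ((m + 1 : Nat) : Int)) 1 =
          PySem.List.pyRange 1 (1 + (m : Int)) 1 ++ [((m + 1 : Nat) : Int)] := by
        have := PySem.List.pyRange_one_succ_right (a := 1) (b := 1 + (m : Int)) (by omega)
        rw [show (1 : Int) + ((m + 1 : Nat) : Int) = (1 + (m : Int)) + 1 by push_cast; ring, this]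
        congr 2
        push_cast; ring
      rw [hR, List.foldl_append, List.foldl_append, ih]
      simp only [List.foldl_cons, List.foldl_nil]
      rw [pvRing]

-- ===== VERDICT (by name: the statement is the Claim_ definition above) =====
theorem get_spiral_shifts_spec : Claim_equal_get_spiral_shifts := by
  intro n _
  unfold Spec_get_spiral_shifts get_spiral_shifts_alt
  rw [pvA_def]
  by_cases h : n ≤ 1
  · rw [PySem.List.pyRange_one_eq_nil h]
    rfl
  · obtain ⟨m, hm⟩ : ∃ m : Nat, n = 1 + (m : Int) := ⟨(n - 1).toNat, by omega⟩
    subst hm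
    rw [pvFold m]
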